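-- pv_equiv track=rewrite | github.com/HarryXiong24/postgraduate-code-collection | Fall 2023/Advanced Programming/match_symbol/quote_match.py | nextToken
-- ===== SOURCE A (Python) =====
-- def nextToken(s: str) -> bool:
--     if not s:
--         return False
--     if s[0] != '"' or s[-1] != '"':
--         return False
--
--     s = s[1:len(s)-1]
--     i = 0  # start after the first quote
--     while i < len(s):  # iterate until the character before the last quote
--         if s[i] == '"':
--             # If we encounter a quote inside the string
--             # the next character must also be a quote
--             if i + 1 < len(s) and s[i + 1] == '"':
--                 i += 1  # Skip the next quote
--             else:
--                 return False
--         i += 1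
--     return True
-- ===== SOURCE B (Python) =====
-- def nextToken(s: str) -> bool:
--     # Quoted, and no unpaired inner quote survives collapsing doubled quotes.
--     if not s or s[0] != '"' or s[-1] != '"':
--         return False
--     return '"' not in s[1:-1].replace('""', '')
-- ===== Notes on version B (the rewrite author's own statement) =====
-- stated objective: simpler
-- what changed: Replaces the index-walking scan with a lookahead skip by a two-step transform: collapse each doubled quote pair with str.replace and then a single substring-membership test for a surviving quote.
import Mathlib
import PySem

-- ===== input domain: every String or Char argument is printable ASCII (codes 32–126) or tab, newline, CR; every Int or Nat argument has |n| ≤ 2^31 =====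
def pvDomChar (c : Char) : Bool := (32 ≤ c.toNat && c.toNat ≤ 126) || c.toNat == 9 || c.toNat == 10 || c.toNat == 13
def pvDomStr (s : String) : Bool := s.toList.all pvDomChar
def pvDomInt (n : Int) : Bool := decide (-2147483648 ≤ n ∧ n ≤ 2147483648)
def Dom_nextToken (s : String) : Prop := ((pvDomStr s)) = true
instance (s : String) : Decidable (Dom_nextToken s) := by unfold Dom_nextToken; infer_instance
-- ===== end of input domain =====

-- B replaces A's index-walking lookahead scan with replace('""','') followed by a quote-membership test (simpler decomposition, same cost).

-- ===== PORT A =====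
-- the while loop: i walks the inner chars; on '"' it peeks at the next char and skips it
def nextTokenA_loop : List Char → Bool
  | [] => true
  | c :: rest =>
    if c = '"' then
      match rest with
      | c2 :: rest2 => if c2 = '"' then nextTokenA_loop rest2 else false
      | [] => false
    else nextTokenA_loop rest

def nextToken (s : String) : Bool :=
  if s = "" then false
  else if PySem.Str.pyGet? s 0 ≠ some '"' ∨ PySem.Str.pyGet? s (-1) ≠ some '"' then false
  else nextTokenA_loop (PySem.Str.slice s (some 1) (some (PySem.Str.len s - 1))).toList

-- ===== PORT B =====
def nextToken_alt (s : String) : Bool :=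
  if s = "" ∨ PySem.Str.pyGet? s 0 ≠ some '"' ∨ PySem.Str.pyGet? s (-1) ≠ some '"' then false
  else !(PySem.Str.isIn "\"" (PySem.Str.replace (PySem.Str.slice s (some 1) (some (-1))) "\"\"" ""))

-- ===== PRECONDITION & SPEC =====
def Spec_nextToken (s : String) (out : Bool) : Prop := out = nextToken_alt s
instance (s : String) (out : Bool) : Decidable (Spec_nextToken s out) := by unfold Spec_nextToken; infer_instance

-- ===== CLAIM (what is proved, stated in full; the proofs are below) =====
def Claim_equal_nextToken : Prop := ∀ (s : String), Dom_nextToken s → Spec_nextToken s (nextToken s)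

-- ===== LEMMAS AND PROOFS =====

-- reference form of replace(l, '""', ''): drop each doubled pair, keep everything else
def repCh : List Char → List Char
  | [] => []
  | [c] => [c]
  | c :: c2 :: t => if c = '"' ∧ c2 = '"' then repCh t else c :: repCh (c2 :: t)

-- replace.go with enough fuel computes acc.reverse ++ repCh l (for old = '""', new = '')
theorem go_eq_repCh (fuel : Nat) : ∀ l : List Char, l.length ≤ fuel → ∀ acc : List Char,
    PySem.Chars.replace.go ['"', '"'] [] fuel l acc = acc.reverse ++ repCh l := by
  induction fuel with
  | zero =>
    intro l hl acc
    have : l = [] := List.eq_nil_of_length_eq_zero (by omega)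
    subst this
    simp [PySem.Chars.replace.go, repCh]
  | succ n ih =>
    intro l hl acc
    match l with
    | [] => simp [PySem.Chars.replace.go, repCh]
    | [c] =>
      have hpre : List.isPrefixOf ['"', '"'] [c] = false := by
        simp [List.isPrefixOf]
      simp only [PySem.Chars.replace.go, hpre, Bool.false_eq_true, if_false]
      rw [ih [] (by simp)]
      simp [repCh]
    | c :: c2 :: t =>
      by_cases hp : c = '"' ∧ c2 = '"'
      · obtain ⟨rfl, rfl⟩ := hp
        have hpre : List.isPrefixOf ['"', '"'] ('"' :: '"' :: t) = true := by
          simp [List.isPrefixOf]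
        simp only [PySem.Chars.replace.go, hpre, if_pos]
        rw [show List.drop (['"', '"'] : List Char).length ('"' :: '"' :: t) = t from rfl,
            ih t (by simp at hl ⊢; omega)]
        simp [repCh]
      · have hpre : List.isPrefixOf ['"', '"'] (c :: c2 :: t) = false := by
          by_cases hc : c = '"'
          · subst hc
            have hc2 : ¬ c2 = '"' := fun h => hp ⟨rfl, h⟩
            simp [List.isPrefixOf]
            exact fun h => hc2 h.symm
          · simp [List.isPrefixOf]
            exact fun h => absurd h.symm hc
        simp only [PySem.Chars.replace.go, hpre, Bool.false_eq_true, if_false]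
        rw [ih (c2 :: t) (by simp at hl ⊢; omega)]
        simp [repCh, hp]

theorem replace_eq_repCh (l : List Char) :
    PySem.Chars.replace l ['"', '"'] [] = repCh l := by
  simp only [PySem.Chars.replace]
  rw [if_neg (by simp)]
  simpa using go_eq_repCh l.length l le_rfl []

-- singleton infix = membership
theorem singleton_infix_iff (a : Char) (l : List Char) : ([a] <:+: l) ↔ a ∈ l := by
  constructor
  · rintro ⟨u, v, rfl⟩; simp
  · intro h
    obtain ⟨u, v, rfl⟩ := List.append_of_mem h
    exact ⟨u, v, by simp⟩

-- core: A's lookahead scan succeeds iff no quote survives the pair-collapsing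
theorem loop_eq_not_mem_repCh (n : Nat) : ∀ l : List Char, l.length ≤ n →
    nextTokenA_loop l = !(decide ('"' ∈ repCh l)) := by
  induction n with
  | zero =>
    intro l hl
    have : l = [] := List.eq_nil_of_length_eq_zero (by omega)
    subst this; decide
  | succ n ih =>
    intro l hl
    match l with
    | [] => decide
    | [c] =>
      by_cases hc : c = '"'
      · subst hc; simp [nextTokenA_loop, repCh]
      · simp [nextTokenA_loop, repCh, hc, Ne.symm hc]
    | c :: c2 :: t =>
      by_cases hc : c = '"'
      · subst hc
        by_cases hc2 : c2 = '"'
        · subst hc2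
          simp only [nextTokenA_loop, if_pos]
          rw [ih t (by simp at hl ⊢; omega)]
          simp [repCh]
        · simp [nextTokenA_loop, hc2, repCh]
      · have hA : nextTokenA_loop (c :: c2 :: t) = nextTokenA_loop (c2 :: t) := by
          simp [nextTokenA_loop, hc]
        have hR : repCh (c :: c2 :: t) = c :: repCh (c2 :: t) := by
          simp [repCh, hc]
        rw [hA, hR, ih (c2 :: t) (by simp at hl ⊢; omega)]
        simp [Ne.symm hc]

-- the two inner slices coincide: s[1:len(s)-1] = s[1:-1] for nonempty s
theorem slices_agree (l : List Char) (h : l ≠ []) :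
    PySem.List.slice l (some 1) (some ((l.length : Int) - 1))
      = PySem.List.slice l (some 1) (some (-1)) := by
  have hlen : 1 ≤ l.length := List.length_pos_iff.mpr h
  have h1 : ((l.length : Int) - 1) = ((l.length - 1 : Nat) : Int) := by omega
  have hone : (1 : Int) = ((1 : Nat) : Int) := rfl
  have hc1 : PySem.List.clampIdx l.length 1 = 1 := by
    rw [hone, PySem.List.clampIdx_natCast]; omega
  have eL : PySem.List.slice l (some 1) (some ((l.length : Int) - 1))
      = List.take (l.length - 2) (List.drop 1 l) := by
    rw [h1, hone, PySem.List.slice_natCast]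
    congr 1
  have eR : PySem.List.slice l (some 1) (some (-1))
      = List.take (l.length - 2) (List.drop 1 l) := by
    simp only [PySem.List.slice, hc1, PySem.List.clampIdx_neg_one]
    congr 1
  rw [eL, eR]

-- ===== VERDICT (by name: the statement is the Claim_ definition above) =====
theorem nextToken_spec : Claim_equal_nextToken := by
  intro s _
  unfold Spec_nextToken nextToken nextToken_alt
  by_cases h0 : s = ""
  · rw [if_pos h0, if_pos (Or.inl h0)]
  · rw [if_neg h0]
    by_cases hg : PySem.Str.pyGet? s 0 ≠ some '"' ∨ PySem.Str.pyGet? s (-1) ≠ some '"'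
    · rw [if_pos hg, if_pos (Or.inr hg)]
    · rw [if_neg hg, if_neg (by tauto : ¬(s = "" ∨ PySem.Str.pyGet? s 0 ≠ some '"' ∨ PySem.Str.pyGet? s (-1) ≠ some '"'))]
      have hne : s.toList ≠ [] := by
        intro hnil; apply h0; cases s; simp_all
      have hslice : (PySem.Str.slice s (some 1) (some (PySem.Str.len s - 1))).toList
          = (PySem.Str.slice s (some 1) (some (-1))).toList := by
        rw [PySem.Str.toList_slice, PySem.Str.toList_slice,
            PySem.Chars.slice_eq_listSlice, PySem.Chars.slice_eq_listSlice,
            PySem.Str.len_eq]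
        exact slices_agree s.toList hne
      set inner := (PySem.Str.slice s (some 1) (some (-1))).toList with hinner
      rw [hslice]
      rw [loop_eq_not_mem_repCh inner.length inner le_rfl]
      rw [PySem.Str.isIn_eq]
      rw [show (PySem.Str.replace (PySem.Str.slice s (some 1) (some (-1))) "\"\"" "").toList
            = PySem.Chars.replace inner ['"', '"'] [] from by
        rw [PySem.Str.toList_replace]; rfl]
      rw [replace_eq_repCh]
      rw [show ("\"" : String).toList = ['"'] from rfl]
      rcases h : PySem.Chars.isIn ['"'] (repCh inner) with _ | _
      · have := (PySem.Chars.isIn_eq_false_iff _ _).mp h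
        simp [singleton_infix_iff] at this
        simp [this]
      · have := (PySem.Chars.isIn_iff_infix _ _).mp h
        rw [singleton_infix_iff] at this
        simp [this]
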